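-- pv_equiv track=rewrite | github.com/davll/practical-algorithms | LeetCode/686-repeated_string_match.py | compare_repeated_v2
-- ===== SOURCE A (Python) =====
-- def compare_repeated_v2(A, B):
--     m, n = len(A), len(B)
--     def check(i):
--         return all(A[(i+j)%m] == B[j] for j in range(n))
--     hb = sum(map(lambda i: ord(B[i]), range(n)))
--     ha = sum(map(lambda i: ord(A[i%m]), range(n)))
--     if ha == hb and check(0):
--         return (n + m - 1) // m
--     for i in range(1,m):
--         ha = ha - ord(A[i-1]) + ord(A[(i+n-1)%m])
--         if ha == hb and check(i):
--             return (i + n + m - 1) // m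
--     return -1
-- ===== SOURCE B (Python) =====
-- def compare_repeated_v2(A, B):
--     m, n = len(A), len(B)
--     reps = (m + n + m - 1) // m
--     text = A * reps
--     for p in range(m):
--         if text[p:p+n] == B:
--             return (p + n + m - 1) // m
--     return -1
-- ===== Notes on version B (the rewrite author's own statement) =====
-- stated objective: simpler
-- what changed: Replaces the rolling-hash (Rabin-Karp style) scan over circular modular indexing with an explicit repeated text built once and a direct slice-comparison scan for the first occurrence; Pre_ excludes empty A, on which both raise ZeroDivisionError.
import Mathlib
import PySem

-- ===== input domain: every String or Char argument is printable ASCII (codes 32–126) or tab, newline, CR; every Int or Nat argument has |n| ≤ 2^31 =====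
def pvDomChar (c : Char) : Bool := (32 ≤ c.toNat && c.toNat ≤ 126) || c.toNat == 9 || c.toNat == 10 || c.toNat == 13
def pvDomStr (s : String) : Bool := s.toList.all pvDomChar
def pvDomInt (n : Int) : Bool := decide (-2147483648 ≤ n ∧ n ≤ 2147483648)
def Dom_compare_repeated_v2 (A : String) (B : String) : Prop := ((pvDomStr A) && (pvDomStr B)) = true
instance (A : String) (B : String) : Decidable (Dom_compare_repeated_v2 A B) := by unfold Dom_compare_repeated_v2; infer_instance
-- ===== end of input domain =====

-- B replaces A's rolling-hash scan over circular modular indexing by an explicit repeated text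
-- searched with direct slice comparison (objective: simpler, same asymptotic cost).

-- ===== PORT A =====
-- check(i): all(A[(i+j)%m] == B[j] for j in range(n))
def pvCheckA (a b : List Char) (m n i : Nat) : Bool :=
  (List.range n).all (fun j => a.getD ((i + j) % m) ' ' == b.getD j ' ')

-- the 'for i in range(1, m)' loop of A, with rolling hash ha and early return
def pvLoopA (a b : List Char) (m n : Nat) (hb : Int) : List Nat → Int → Int
  | [], _ => -1
  | i :: rest, ha =>
    let ha' := ha - ((a.getD (i - 1) ' ').toNat : Int) + ((a.getD ((i + n - 1) % m) ' ').toNat : Int)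
    if ha' == hb && pvCheckA a b m n i then ((i + n + m - 1) / m : Nat)
    else pvLoopA a b m n hb rest ha'

def compare_repeated_v2 (A : String) (B : String) : Int :=
  let a := A.toList
  let b := B.toList
  let m := a.length
  let n := b.length
  let hb : Int := ((List.range n).map (fun i => ((b.getD i ' ').toNat : Int))).sum
  let ha : Int := ((List.range n).map (fun i => ((a.getD (i % m) ' ').toNat : Int))).sum
  if ha == hb && pvCheckA a b m n 0 then ((n + m - 1) / m : Nat)
  else pvLoopA a b m n hb (List.range' 1 (m - 1)) ha

-- ===== PORT B =====
-- the 'for p in range(m)' loop of B: text[p:p+n] == B, early return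
def pvLoopB (text b : List Char) (m n : Nat) : List Nat → Int
  | [] => -1
  | p :: rest =>
    if (text.drop p).take n == b then ((p + n + m - 1) / m : Nat)
    else pvLoopB text b m n rest

def compare_repeated_v2_alt (A : String) (B : String) : Int :=
  let a := A.toList
  let b := B.toList
  let m := a.length
  let n := b.length
  let reps := (m + n + m - 1) / m
  let text := (List.replicate reps a).flatten
  pvLoopB text b m n (List.range m)

-- ===== PRECONDITION & SPEC =====
-- Pre_ excludes only empty A, on which the Python A raises ZeroDivisionError (so does B).
def Pre_compare_repeated_v2 (A : String) (B : String) : Prop := A.toList ≠ []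
instance (A : String) (B : String) : Decidable (Pre_compare_repeated_v2 A B) := by
  unfold Pre_compare_repeated_v2; infer_instance

def pvWitness_compare_repeated_v2 : String × String := ("abcd", "cdabcdab")

def Spec_compare_repeated_v2 (A : String) (B : String) (out : Int) : Prop := out = compare_repeated_v2_alt A B
instance (A : String) (B : String) (out : Int) : Decidable (Spec_compare_repeated_v2 A B out) := by unfold Spec_compare_repeated_v2; infer_instance

-- ===== CLAIM (what is proved, stated in full; the proofs are below) =====
def Claim_equal_compare_repeated_v2 : Prop := ∀ (A : String) (B : String), Dom_compare_repeated_v2 A B → Pre_compare_repeated_v2 A B → Spec_compare_repeated_v2 A B (compare_repeated_v2 A B)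

-- ===== LEMMAS AND PROOFS =====

def pvS (a : List Char) (m n i : Nat) : Int :=
  ((List.range n).map (fun j => ((a.getD ((i + j) % m) ' ').toNat : Int))).sum

theorem pvS_eq_finset (a : List Char) (m n i : Nat) :
    pvS a m n i = ∑ j ∈ Finset.range n, ((a.getD ((i + j) % m) ' ').toNat : Int) := rfl

theorem pvS_shift (a : List Char) (m n i : Nat) :
    pvS a m n (i + 1) =
      pvS a m n i - ((a.getD (i % m) ' ').toNat : Int) + ((a.getD ((i + n) % m) ' ').toNat : Int) := by
  have h1 : pvS a m n (i+1) = ∑ j ∈ Finset.range n, ((a.getD ((i + (j+1)) % m) ' ').toNat : Int) := by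
    rw [pvS_eq_finset]; apply Finset.sum_congr rfl; intro j _
    have h : i + 1 + j = i + (j + 1) := by omega
    rw [h]
  have h2 := Finset.sum_range_succ' (fun j => ((a.getD ((i + j) % m) ' ').toNat : Int)) n
  have h3 := Finset.sum_range_succ (fun j => ((a.getD ((i + j) % m) ' ').toNat : Int)) n
  rw [h1, pvS_eq_finset]
  simp only [Nat.add_zero] at h2 h3
  omega

theorem pvCheckA_iff (a b : List Char) (m n i : Nat) :
    pvCheckA a b m n i = true ↔ ∀ j < n, a.getD ((i + j) % m) ' ' = b.getD j ' ' := by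
  simp [pvCheckA, List.all_eq_true, List.mem_range]

theorem pvCheck_sum (a b : List Char) (m n : Nat) (i : Nat)
    (h : pvCheckA a b m n i = true) :
    pvS a m n i = ((List.range n).map (fun j => ((b.getD j ' ').toNat : Int))).sum := by
  rw [pvCheckA_iff] at h
  unfold pvS
  congr 1
  apply List.map_congr_left
  intro j hj
  rw [h j (List.mem_range.mp hj)]

theorem pvReps_big (m n : Nat) (hm : 0 < m) : m + n ≤ ((m + n + m - 1) / m) * m := by
  have h1 := Nat.div_add_mod' (m + n + m - 1) m
  have h2 := Nat.mod_lt (m + n + m - 1) hm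
  omega

theorem pvText_get (a : List Char) (r k : Nat) (hm : a ≠ []) (hk : k < r * a.length) :
    ((List.replicate r a).flatten).getD k ' ' = a.getD (k % a.length) ' ' := by
  induction r generalizing k with
  | zero => omega
  | succ r ih =>
    have hlen : 0 < a.length := List.length_pos_iff.mpr hm
    rw [List.replicate_succ, List.flatten_cons]
    by_cases hka : k < a.length
    · rw [List.getD_append _ _ _ _ hka, Nat.mod_eq_of_lt hka]
    · have hmul : (r + 1) * a.length = r * a.length + a.length := by ring
      have hk' : k - a.length < r * a.length := by omega
      have hmod : k % a.length = (k - a.length) % a.length := Nat.mod_eq_sub_mod (by omega)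
      rw [List.getD_append_right _ _ _ _ (by omega), ih (k - a.length) hk', hmod]

theorem pvText_len (a : List Char) (r : Nat) :
    ((List.replicate r a).flatten).length = r * a.length := by
  simp [List.length_flatten, List.map_replicate, List.sum_replicate, smul_eq_mul]

theorem pvSlice_eq_check (a b : List Char) (r p : Nat) (hm : a ≠ [])
    (hp : p < a.length) (hr : a.length + b.length ≤ r * a.length) :
    ((((List.replicate r a).flatten).drop p).take b.length == b) =
      pvCheckA a b a.length b.length p := by
  have htl := pvText_len a r
  have hpn : p + b.length ≤ r * a.length := by omega
  have hlen : ((((List.replicate r a).flatten).drop p).take b.length).length = b.length := by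
    simp [List.length_take, List.length_drop, htl]; omega
  rw [Bool.eq_iff_iff, beq_iff_eq, pvCheckA_iff]
  constructor
  · intro h j hj
    have h1 : ((((List.replicate r a).flatten).drop p).take b.length).getD j ' ' = b.getD j ' ' := by rw [h]
    rw [List.getD_eq_getElem _ _ (by omega : j < _)] at h1
    rw [List.getElem_take, List.getElem_drop] at h1
    rw [← h1, ← List.getD_eq_getElem _ ' ' (by omega), pvText_get a r (p+j) hm (by omega)]
  · intro h
    apply List.ext_getElem (by rw [hlen])
    intro j h1 h2
    rw [List.getElem_take, List.getElem_drop]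
    have := h j (by omega)
    rw [← List.getD_eq_getElem _ ' ' (by omega : p + j < ((List.replicate r a).flatten).length),
      pvText_get a r (p+j) hm (by omega), ← List.getD_eq_getElem b ' ' (by omega)] at *
    exact this

def pvFirstHit (a b : List Char) (m n : Nat) (L : List Nat) : Int :=
  match L.find? (fun p => pvCheckA a b m n p) with
  | some p => ((p + n + m - 1) / m : Nat)
  | none => -1

theorem pvLoopB_eq (a b : List Char) (r : Nat) (hm : a ≠ [])
    (hr : a.length + b.length ≤ r * a.length) :
    ∀ (L : List Nat), (∀ p ∈ L, p < a.length) →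
      pvLoopB ((List.replicate r a).flatten) b a.length b.length L =
        pvFirstHit a b a.length b.length L := by
  intro L
  induction L with
  | nil => intro _; rfl
  | cons p rest ih =>
    intro hmem
    have hp : p < a.length := hmem p (List.mem_cons_self ..)
    rw [pvLoopB, pvFirstHit, List.find?_cons, pvSlice_eq_check a b r p hm hp hr]
    by_cases hc : pvCheckA a b a.length b.length p = true
    · simp [hc]
    · simp only [Bool.not_eq_true] at hc
      simp only [hc, if_false, Bool.false_eq_true]
      rw [ih (fun q hq => hmem q (List.mem_cons_of_mem _ hq)), pvFirstHit]

theorem pvLoopA_eq (a b : List Char) (m n : Nat) (hm2 : m = a.length) (hn : n = b.length) :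
    ∀ (k i : Nat) (ha : Int), 1 ≤ i → i + k ≤ m →
      ha = pvS a m n (i - 1) →
      pvLoopA a b m n (((List.range n).map (fun j => ((b.getD j ' ').toNat : Int))).sum)
        (List.range' i k) ha = pvFirstHit a b m n (List.range' i k) := by
  intro k
  induction k with
  | zero => intro i ha _ _ _; rfl
  | succ k ih =>
    intro i ha hi hik hha
    rw [List.range'_succ, pvLoopA, pvFirstHit, List.find?_cons]
    have him : i - 1 < m := by omega
    have hstep : ha - ((a.getD (i - 1) ' ').toNat : Int) + ((a.getD ((i + n - 1) % m) ' ').toNat : Int)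
        = pvS a m n i := by
      have hs := pvS_shift a m n (i - 1)
      have e1 : i - 1 + 1 = i := by omega
      have e2 : (i - 1) % m = i - 1 := Nat.mod_eq_of_lt him
      have e3 : i - 1 + n = i + n - 1 := by omega
      rw [e1, e2, e3] at hs
      omega
    simp only [hstep]
    by_cases hc : pvCheckA a b m n i = true
    · have hsum := pvCheck_sum a b m n i hc
      simp [hc, hsum]
    · simp only [Bool.not_eq_true] at hc
      simp only [hc, Bool.and_false, if_false, Bool.false_eq_true]
      rw [ih (i+1) _ (by omega) (by omega) (by rw [Nat.add_sub_cancel]),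
        pvFirstHit]
theorem pvAfirst (a b : List Char) (hpre : a ≠ []) :
    (if (((List.range b.length).map (fun i => ((a.getD (i % a.length) ' ').toNat : Int))).sum ==
          ((List.range b.length).map (fun i => ((b.getD i ' ').toNat : Int))).sum
        && pvCheckA a b a.length b.length 0) = true
     then (((b.length + a.length - 1) / a.length : Nat) : Int)
     else pvLoopA a b a.length b.length
        (((List.range b.length).map (fun i => ((b.getD i ' ').toNat : Int))).sum)
        (List.range' 1 (a.length - 1))
        (((List.range b.length).map (fun i => ((a.getD (i % a.length) ' ').toNat : Int))).sum))
    = pvFirstHit a b a.length b.length (List.range a.length) := by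
  have hm : 0 < a.length := List.length_pos_iff.mpr hpre
  have hS0 : ((List.range b.length).map (fun i => ((a.getD (i % a.length) ' ').toNat : Int))).sum
      = pvS a a.length b.length 0 := by
    unfold pvS; congr 1; apply List.map_congr_left; intro j _; rw [Nat.zero_add]
  have hrange : List.range a.length = 0 :: List.range' 1 (a.length - 1) := by
    conv_lhs => rw [List.range_eq_range', show a.length = (a.length - 1) + 1 from by omega]
    rw [List.range'_succ]
  rw [hrange, pvFirstHit, List.find?_cons, hS0]
  by_cases hc : pvCheckA a b a.length b.length 0 = true
  · have hsum := pvCheck_sum a b a.length b.length 0 hc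
    rw [hsum]
    simp only [hc, beq_self_eq_true, Bool.true_and, if_true]
    norm_num
  · simp only [Bool.not_eq_true] at hc
    simp only [hc, Bool.and_false, if_false, Bool.false_eq_true]
    rw [pvLoopA_eq a b a.length b.length rfl rfl (a.length - 1) 1 (pvS a a.length b.length 0)
        (by omega) (by omega) rfl, pvFirstHit]

theorem pv_final (A B : String) (hpre : A.toList ≠ []) :
    compare_repeated_v2 A B = compare_repeated_v2_alt A B := by
  have hm : 0 < A.toList.length := List.length_pos_iff.mpr hpre
  have hr : A.toList.length + B.toList.length ≤
      ((A.toList.length + B.toList.length + A.toList.length - 1) / A.toList.length) * A.toList.length :=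
    pvReps_big _ _ hm
  have hB : compare_repeated_v2_alt A B
      = pvFirstHit A.toList B.toList A.toList.length B.toList.length (List.range A.toList.length) := by
    show pvLoopB _ _ _ _ _ = _
    exact pvLoopB_eq A.toList B.toList _ hpre hr (List.range A.toList.length)
      (fun p hp => List.mem_range.mp hp)
  rw [hB]
  exact pvAfirst A.toList B.toList hpre

-- ===== VERDICT (by name: the statement is the Claim_ definition above) =====
theorem compare_repeated_v2_spec : Claim_equal_compare_repeated_v2 := by
  intro A B _ hpre
  exact pv_final A B hpre
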